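-- pv_equiv track=rewrite | github.com/Gautam-8/Adaptive-chunking-system | src/adaptive_chunking/strategies/code_aware_chunking.py | _split_around_code_blocks
-- ===== SOURCE A (Python) =====
-- from typing import List, Dict, Any, Tuple
--
-- def _split_around_code_blocks(content: str, code_blocks: List[Tuple[int, int, str]]) -> List[Tuple[str, str]]:
--     """Split content into sections around code blocks."""
--     sections = []
--     last_end = 0
--
--     for start, end, code_content in code_blocks:
--         # Add text before code block
--         if start > last_end:
--             text_content = content[last_end:start].strip()
--             if text_content:
--                 sections.append((text_content, "text"))
--
--         # Add code block
--         sections.append((code_content, "code"))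
--         last_end = end
--
--     # Add remaining text
--     if last_end < len(content):
--         text_content = content[last_end:].strip()
--         if text_content:
--             sections.append((text_content, "text"))
--
--     return sections
-- ===== SOURCE B (Python) =====
-- from typing import List, Tuple
--
-- def _split_around_code_blocks(content: str, code_blocks: List[Tuple[int, int, str]]) -> List[Tuple[str, str]]:
--     """Split content into sections around code blocks, built back-to-front.
--
--     Walks the blocks in reverse order, prepending to the result; each block's
--     preceding text starts at the previous block's end, read off a precomputed
--     ends table instead of a running cursor."""
--     ends = [0] + [e for _, e, _ in code_blocks]
--     # seed: trailing text after the final block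
--     out: List[Tuple[str, str]] = []
--     if ends[-1] < len(content):
--         t = content[ends[-1]:].strip()
--         if t:
--             out = [(t, "text")]
--     # reverse walk, prepending code then the text that precedes it
--     for i in range(len(code_blocks) - 1, -1, -1):
--         start, _, code = code_blocks[i]
--         out = [(code, "code")] + out
--         if start > ends[i]:
--             t = content[ends[i]:start].strip()
--             if t:
--                 out = [(t, "text")] + out
--     return out
-- ===== Notes on version B (the rewrite author's own statement) =====
-- stated objective: alternative
-- what changed: A sweeps the blocks forward with a mutable last_end cursor, appending guarded text then code to a growing list; B builds the result back-to-front: it precomputes an ends table, seeds the result with the trailing text, then walks the blocks in reverse prepending each code block and its preceding text (start bound read from the ends table, no running cursor).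
import Mathlib
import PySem

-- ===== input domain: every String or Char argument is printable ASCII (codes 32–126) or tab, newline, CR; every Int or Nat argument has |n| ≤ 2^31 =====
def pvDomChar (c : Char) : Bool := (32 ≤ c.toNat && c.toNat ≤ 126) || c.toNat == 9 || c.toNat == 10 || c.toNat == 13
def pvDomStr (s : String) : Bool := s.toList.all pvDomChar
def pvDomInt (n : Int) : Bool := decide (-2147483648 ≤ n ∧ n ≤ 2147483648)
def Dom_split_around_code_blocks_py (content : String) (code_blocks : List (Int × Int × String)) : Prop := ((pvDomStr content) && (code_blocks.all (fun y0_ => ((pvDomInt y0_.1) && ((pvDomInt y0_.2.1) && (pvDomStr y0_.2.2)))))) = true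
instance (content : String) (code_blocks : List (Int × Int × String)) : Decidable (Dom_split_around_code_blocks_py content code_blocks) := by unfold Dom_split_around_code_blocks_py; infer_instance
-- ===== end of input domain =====

-- B builds the section list back-to-front: trailing text first, then a reverse walk over
-- the blocks prepending code and its preceding text, bounds read from a precomputed ends
-- table instead of A's forward mutable last_end cursor. Objective: alternative.

-- ===== PORT A =====
-- loop body of A's for-loop (state: sections so far, last_end)
def pvStepA (content : String) (st : List (String × String) × Int)
    (b : Int × Int × String) : List (String × String) × Int :=
  let secs :=
    if b.1 > st.2 then
      let t := PySem.Str.strip (PySem.Str.slice content (some st.2) (some b.1))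
      if t ≠ "" then st.1 ++ [(t, "text")] else st.1
    else st.1
  (secs ++ [(b.2.2, "code")], b.2.1)

def split_around_code_blocks_py (content : String) (code_blocks : List (Int × Int × String)) : List (String × String) :=
  let st := code_blocks.foldl (pvStepA content) ([], 0)
  if st.2 < PySem.Str.len content then
    let t := PySem.Str.strip (PySem.Str.slice content (some st.2) none)
    if t ≠ "" then st.1 ++ [(t, "text")] else st.1
  else st.1

-- ===== PORT B =====
-- reverse-walk body: prepend the code block, then the text that precedes it (bp = (block, its preceding end))
def pvStepB (content : String) (bp : (Int × Int × String) × Int)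
    (out : List (String × String)) : List (String × String) :=
  let out1 := (bp.1.2.2, "code") :: out
  if bp.1.1 > bp.2 then
    let t := PySem.Str.strip (PySem.Str.slice content (some bp.2) (some bp.1.1))
    if t ≠ "" then (t, "text") :: out1 else out1
  else out1

-- seed of the reverse walk: the trailing text after the final block
def pvSeedB (content : String) (last : Int) : List (String × String) :=
  if last < PySem.Str.len content then
    let t := PySem.Str.strip (PySem.Str.slice content (some last) none)
    if t ≠ "" then [(t, "text")] else []
  else []

def split_around_code_blocks_py_alt (content : String) (code_blocks : List (Int × Int × String)) : List (String × String) :=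
  let ends := (0 : Int) :: code_blocks.map (fun b => b.2.1)
  let seed := pvSeedB content (ends.getLastD 0)
  (code_blocks.zip ends).foldr (pvStepB content) seed

-- ===== PRECONDITION & SPEC =====
def Spec_split_around_code_blocks_py (content : String) (code_blocks : List (Int × Int × String)) (out : List (String × String)) : Prop := out = split_around_code_blocks_py_alt content code_blocks
instance (content : String) (code_blocks : List (Int × Int × String)) (out : List (String × String)) : Decidable (Spec_split_around_code_blocks_py content code_blocks out) := by unfold Spec_split_around_code_blocks_py; infer_instance

-- ===== CLAIM (what is proved, stated in full; the proofs are below) =====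
def Claim_equal_split_around_code_blocks_py : Prop := ∀ (content : String) (code_blocks : List (Int × Int × String)), Dom_split_around_code_blocks_py content code_blocks → Spec_split_around_code_blocks_py content code_blocks (split_around_code_blocks_py content code_blocks)

-- ===== LEMMAS AND PROOFS =====
-- A's tail handling, as a function of the final (sections, last_end) state
def pvTailA (content : String) (st : List (String × String) × Int) : List (String × String) :=
  if st.2 < PySem.Str.len content then
    let t := PySem.Str.strip (PySem.Str.slice content (some st.2) none)
    if t ≠ "" then st.1 ++ [(t, "text")] else st.1
  else st.1

-- main invariant: A's forward fold plus tail = accumulated sections ++ B's reverse walk,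
-- with the preceding-ends list shifted by prev and the seed at the last block's end
theorem main_inv (content : String) (bs : List (Int × Int × String)) :
    ∀ (prev : Int) (secs : List (String × String)),
    pvTailA content (bs.foldl (pvStepA content) (secs, prev)) =
      secs ++ (bs.zip (prev :: bs.map (fun b => b.2.1))).foldr (pvStepB content)
        (pvSeedB content (((bs.getLast?).map (fun b => b.2.1)).getD prev)) := by
  induction bs with
  | nil =>
    intro prev secs
    simp [pvTailA, pvSeedB]
    split_ifs <;> simp
  | cons b bs ih =>
    intro prev secs
    simp only [List.foldl_cons, List.map_cons, List.zip_cons_cons, List.foldr_cons]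
    rw [show pvStepA content (secs, prev) b =
        ((if b.1 > prev then
            (if PySem.Str.strip (PySem.Str.slice content (some prev) (some b.1)) ≠ "" then
              secs ++ [(PySem.Str.strip (PySem.Str.slice content (some prev) (some b.1)), "text")]
            else secs)
          else secs) ++ [(b.2.2, "code")], b.2.1) from rfl]
    rw [ih b.2.1]
    have hlast : ((b :: bs).getLast?.map (fun b => b.2.1)).getD prev
        = ((bs.getLast?).map (fun b => b.2.1)).getD b.2.1 := by
      cases bs with
      | nil => simp
      | cons c cs =>
        rw [List.getLast?_cons_cons]
        cases h : (c :: cs).getLast? with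
        | none => simp [List.getLast?_eq_none_iff] at h
        | some x => simp
    rw [← hlast]
    unfold pvStepB
    split_ifs <;> simp_all

theorem getLastD_shift (l : List Int) : ((0 : Int) :: l).getLastD 0 = l.getLastD 0 := by
  cases l <;> simp

theorem getLastD_map (bs : List (Int × Int × String)) :
    (bs.map (fun b => b.2.1)).getLastD 0 = ((bs.getLast?).map (fun b => b.2.1)).getD 0 := by
  induction bs with
  | nil => rfl
  | cons b bs ih =>
    cases bs with
    | nil => simp
    | cons c cs =>
      simp only [List.map_cons, List.getLastD_cons, List.getLast?_cons_cons] at *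
      exact ih

-- ===== VERDICT (by name: the statement is the Claim_ definition above) =====
theorem split_around_code_blocks_py_spec : Claim_equal_split_around_code_blocks_py := by
  intro content code_blocks _
  unfold Spec_split_around_code_blocks_py split_around_code_blocks_py split_around_code_blocks_py_alt
  show pvTailA content (code_blocks.foldl (pvStepA content) ([], 0))
      = (code_blocks.zip ((0 : Int) :: code_blocks.map (fun b => b.2.1))).foldr (pvStepB content)
          (pvSeedB content (((0 : Int) :: code_blocks.map (fun b => b.2.1)).getLastD 0))
  rw [main_inv content code_blocks 0 [], getLastD_shift, getLastD_map]
  simp
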